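-- pv_equiv track=rewrite | github.com/KarinShimel/Moti-Smart-Meetings | Moti_Server/main.py | get_participants_from_dict
-- ===== SOURCE A (Python) =====
-- def get_participants_from_dict(participants_count):
--     # the param is a dict specifying how many times each participant took place in a meeting in the cluster
--     count = {}
--     # reversing the dict based on keys (appearances of the user in meetings in the cluster)
--     for key in participants_count:
--         if participants_count[key] not in count:
--             count[participants_count[key]] = [key]
--         else:
--             count[participants_count[key]].append(key)
--
--     keys = list(count.keys())
--     keys.sort(reverse=True)
--     # getting 70% of highest attending participants
--     keys = keys[0:int(round(0.7 * len(keys)))]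
--     participants = []
--     for key in keys:
--         participants += count[key]
--     return participants
-- ===== SOURCE B (Python) =====
-- def get_participants_from_dict(participants_count):
--     # sort-and-threshold: smallest selected count is the cutoff; one stable sort
--     # of the participants by count (descending) keeps insertion order among ties
--     distinct = sorted(set(participants_count.values()), reverse=True)
--     m = int(round(0.7 * len(distinct)))
--     if m == 0:
--         return []
--     cutoff = distinct[m - 1]
--     return [k for k, v in sorted(participants_count.items(),
--                                  key=lambda kv: kv[1], reverse=True) if v >= cutoff]
-- ===== Notes on version B (the rewrite author's own statement) =====
-- stated objective: alternative
-- what changed: Replaces A's reverse-dict bucket grouping followed by sorting the distinct counts and concatenating the selected buckets with a single stable descending sort of the participants by count, thresholded at the smallest selected count (the m-th largest distinct count, m = int(round(0.7*len(distinct)))); sort stability keeps dict-insertion order among equal counts.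
import Mathlib
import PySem

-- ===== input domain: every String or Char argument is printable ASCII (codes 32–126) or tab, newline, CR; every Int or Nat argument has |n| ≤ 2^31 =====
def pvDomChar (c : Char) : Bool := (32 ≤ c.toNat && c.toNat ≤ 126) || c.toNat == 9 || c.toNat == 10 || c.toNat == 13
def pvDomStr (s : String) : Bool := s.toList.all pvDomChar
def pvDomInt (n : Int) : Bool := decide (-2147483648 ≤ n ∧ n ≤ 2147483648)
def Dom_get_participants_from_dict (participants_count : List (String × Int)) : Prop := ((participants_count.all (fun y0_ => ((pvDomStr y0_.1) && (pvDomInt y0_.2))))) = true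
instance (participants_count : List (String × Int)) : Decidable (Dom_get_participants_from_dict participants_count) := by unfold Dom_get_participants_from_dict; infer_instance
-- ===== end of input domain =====

-- B replaces A's group-into-buckets-then-concatenate strategy by one stable descending
-- sort of the participants by count plus a threshold at the smallest selected count
-- (objective: alternative decomposition, similar cost).

-- Exact integer model of rounding M / 2^e (1 ≤ e) to the nearest integer, ties to even —
-- the rounding both IEEE-754 binary64 arithmetic and Python's round() use.
def pvRoundHalfEven (M : Nat) (e : Nat) : Nat :=
  if 2 ^ (e - 1) < M % 2 ^ e then M / 2 ^ e + 1
  else if M % 2 ^ e < 2 ^ (e - 1) then M / 2 ^ e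
  else if (M / 2 ^ e) % 2 = 0 then M / 2 ^ e else M / 2 ^ e + 1

-- Exact model of Python's int(round(0.7 * n)) for n ≥ 0 (the builtin both Pythons call):
-- the binary64 literal 0.7 is 3152519739159347/2^52, the product 0.7*n is rounded to 53
-- significant bits (half-even), then round() rounds the resulting double half-even.
def pvRound07 (n : Nat) : Nat :=
  let N := 3152519739159347 * n
  let L := PySem.Int.bitLength (N : Int)
  let M := if L ≤ 53 then N else pvRoundHalfEven N (L - 53) * 2 ^ (L - 53)
  pvRoundHalfEven M 52

-- ===== PORT A =====
-- iterating the Python dict yields each key once, paired here with its value (the assoc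
-- list IS the dict's items, so participants_count[key] is the pair's second component);
-- count[key] in the output loop is getD with an impossible default, every key of `keys`
-- having been inserted into count
def get_participants_from_dict (participants_count : List (String × Int)) : List String :=
  let count : PySem.Dict Int (List String) :=
    participants_count.foldl
      (fun d p =>
        if d.contains p.2 = false then d.insert p.2 [p.1]
        else d.modify p.2 [] (fun l => l ++ [p.1]))
      PySem.Dict.empty
  let keys0 := PySem.List.sorted count.keys (fun k => k) true
  let keys := PySem.List.slice keys0 (some 0) (some (pvRound07 keys0.length : Int))
  keys.foldl (fun participants key => participants ++ count.getD key []) []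

def get_participants_from_dict_alt (participants_count : List (String × Int)) : List String :=
  let distinct := PySem.List.sorted (PySem.Set.ofList (participants_count.map Prod.snd)) (fun c => c) true
  let m := pvRound07 distinct.length
  if m = 0 then []
  else
    let cutoff := PySem.List.pyGetD distinct ((m : Int) - 1) 0
    ((PySem.List.sorted participants_count (fun kv => kv.2) true).filter
        (fun kv => decide (cutoff ≤ kv.2))).map Prod.fst


-- ===== PRECONDITION & SPEC =====
def Spec_get_participants_from_dict (participants_count : List (String × Int)) (out : List String) : Prop := out = get_participants_from_dict_alt participants_count
instance (participants_count : List (String × Int)) (out : List String) : Decidable (Spec_get_participants_from_dict participants_count out) := by unfold Spec_get_participants_from_dict; infer_instance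

-- ===== CLAIM (what is proved, stated in full; the proofs are below) =====
def Claim_equal_get_participants_from_dict : Prop := ∀ (participants_count : List (String × Int)), Dom_get_participants_from_dict participants_count → Spec_get_participants_from_dict participants_count (get_participants_from_dict participants_count)

-- ===== LEMMAS AND PROOFS =====

-- round-half-even of M/2^e is the floor or the floor plus one
theorem pvRoundHalfEven_le (M e : Nat) : pvRoundHalfEven M e ≤ M / 2 ^ e + 1 := by
  unfold pvRoundHalfEven; split_ifs <;> omega

theorem pvRoundHalfEven_le_of_lt {M n : Nat} (h : M < n * 2 ^ 52) :
    pvRoundHalfEven M 52 ≤ n := by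
  have h1 := pvRoundHalfEven_le M 52
  have h2 : M / 2 ^ 52 < n := (Nat.div_lt_iff_lt_mul (by positivity)).mpr h
  omega

-- int(round(0.7*n)) never exceeds n, so the m selected counts always exist
set_option maxRecDepth 4096 in
theorem pvRound07_le (n : Nat) : pvRound07 n ≤ n := by
  rcases Nat.eq_zero_or_pos n with rfl | hn
  · decide
  unfold pvRound07
  apply pvRoundHalfEven_le_of_lt
  have hNT : 3152519739159347 * n < n * 2 ^ 52 := by
    have h : (3152519739159347 : Nat) < 2 ^ 52 := by norm_num
    calc 3152519739159347 * n < 2 ^ 52 * n := (Nat.mul_lt_mul_right hn).mpr h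
      _ = n * 2 ^ 52 := Nat.mul_comm _ _
  split_ifs with hL53
  · exact hNT
  · set N : Nat := 3152519739159347 * n with hN
    set L := PySem.Int.bitLength (N : Int) with hL
    set s := L - 53 with hs
    have hNpos : 0 < N := by positivity
    have hpow : 2 ^ s * 2 ^ 52 ≤ N := by
      have h0 : (N : Int) ≠ 0 := by exact_mod_cast hNpos.ne'
      have h1 := PySem.Int.two_pow_bitLength_le (N : Int) h0
      rw [Int.natAbs_natCast] at h1
      have hrw : L - 1 = s + 52 := by omega
      rw [hrw, pow_add] at h1
      exact h1
    have hM : pvRoundHalfEven N s * 2 ^ s ≤ N + 2 ^ s := by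
      have h1 := pvRoundHalfEven_le N s
      calc pvRoundHalfEven N s * 2 ^ s ≤ (N / 2 ^ s + 1) * 2 ^ s :=
            Nat.mul_le_mul_right _ h1
        _ = N / 2 ^ s * 2 ^ s + 2 ^ s := by ring
        _ ≤ N + 2 ^ s := by have := Nat.div_mul_le_self N (2 ^ s); omega
    have key : (N + 2 ^ s) * 2 ^ 52 < (n * 2 ^ 52) * 2 ^ 52 := by
      have h4 : (3152519739159347 : Nat) * (2 ^ 52 + 1) < 2 ^ 52 * 2 ^ 52 := by norm_num
      calc (N + 2 ^ s) * 2 ^ 52 = N * 2 ^ 52 + 2 ^ s * 2 ^ 52 := by ring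
        _ ≤ N * 2 ^ 52 + N := Nat.add_le_add_left hpow _
        _ = n * (3152519739159347 * (2 ^ 52 + 1)) := by rw [hN]; ring
        _ < n * (2 ^ 52 * 2 ^ 52) := (Nat.mul_lt_mul_left hn).mpr h4
        _ = (n * 2 ^ 52) * 2 ^ 52 := by ring
    have hlt : N + 2 ^ s < n * 2 ^ 52 :=
      Nat.lt_of_mul_lt_mul_right (a := 2 ^ 52) key
    omega


theorem pvSortedSet_rev (L : List Int) :
    PySem.List.sorted (PySem.Set.ofList L) (fun k => k) true
      = (PySem.List.sorted (PySem.Set.ofList L) (fun k => k) false).reverse := by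
  apply PySem.List.sorted_rev_eq_of_perm_of_pairwise_gt
  · exact (List.reverse_perm _).trans (PySem.List.sorted_perm _ _ _)
  · exact (List.pairwise_reverse).mpr (by
      simpa using PySem.List.sorted_ofList_pairwise_lt L)

theorem pvSortedSet_pairwise_gt (L : List Int) :
    (PySem.List.sorted (PySem.Set.ofList L) (fun k => k) true).Pairwise (fun a b => b < a) := by
  rw [pvSortedSet_rev]
  exact (List.pairwise_reverse).mpr (by simpa using PySem.List.sorted_ofList_pairwise_lt L)

def pvInsDesc (c : Int) : List Int → List Int
  | [] => [c]
  | v :: vs => if v < c then c :: v :: vs else if v = c then v :: vs else v :: pvInsDesc c vs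

theorem pvInsDesc_mem (c w : Int) (L : List Int) :
    w ∈ pvInsDesc c L ↔ w = c ∨ w ∈ L := by
  induction L with
  | nil => simp [pvInsDesc]
  | cons v vs ih =>
      by_cases h1 : v < c
      · simp [pvInsDesc, h1]
      · by_cases h2 : v = c
        · subst h2; simp only [pvInsDesc, if_neg h1]; constructor
          · tauto
          · rintro (rfl | h) <;> simp_all
        · simp only [pvInsDesc, if_neg h1, if_neg h2, List.mem_cons, ih]; tauto

theorem pvInsDesc_eq_of_mem (c : Int) (L : List Int)
    (h : L.Pairwise (fun a b => b < a)) (hc : c ∈ L) :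
    pvInsDesc c L = L := by
  induction L with
  | nil => simp at hc
  | cons v vs ih =>
      rcases List.pairwise_cons.mp h with ⟨hv, hvs⟩
      rcases List.mem_cons.mp hc with rfl | hc
      · simp [pvInsDesc]
      · have hlt : c < v := hv c hc
        simp [pvInsDesc, not_lt.mpr (le_of_lt hlt), ih hvs hc]

theorem pvInsDesc_perm_of_not_mem (c : Int) (L : List Int) (hc : c ∉ L) :
    (pvInsDesc c L).Perm (L ++ [c]) := by
  induction L with
  | nil => simp [pvInsDesc]
  | cons v vs ih =>
      have hc1 : ¬ v = c := fun h => hc (by simp [h])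
      have hc2 : c ∉ vs := fun h => hc (by simp [h])
      by_cases h1 : v < c
      · simpa [pvInsDesc, h1] using (List.perm_append_singleton c (v :: vs)).symm
      · simp only [pvInsDesc, if_neg h1, if_neg hc1, List.cons_append]
        exact List.Perm.cons v (ih hc2)

theorem pvInsDesc_pairwise (c : Int) (L : List Int)
    (h : L.Pairwise (fun a b => b < a)) :
    (pvInsDesc c L).Pairwise (fun a b => b < a) := by
  induction L with
  | nil => simp [pvInsDesc]
  | cons v vs ih =>
      rcases List.pairwise_cons.mp h with ⟨hv, hvs⟩
      by_cases h1 : v < c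
      · simp only [pvInsDesc, if_pos h1]
        refine List.pairwise_cons.mpr ⟨?_, h⟩
        intro w hw
        rcases List.mem_cons.mp hw with rfl | hw
        · exact h1
        · exact lt_trans (hv w hw) h1
      · by_cases h2 : v = c
        · simpa [pvInsDesc, h1, h2] using h
        · simp only [pvInsDesc, if_neg h1, if_neg h2]
          refine List.pairwise_cons.mpr ⟨?_, ih hvs⟩
          intro w hw
          rcases (pvInsDesc_mem c w vs).mp hw with rfl | hw
          · omega
          · exact hv w hw

theorem pvSortedSet_add (L : List Int) (c : Int) :
    PySem.List.sorted ((PySem.Set.ofList L).add c) (fun k => k) true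
      = pvInsDesc c (PySem.List.sorted (PySem.Set.ofList L) (fun k => k) true) := by
  by_cases hc : c ∈ PySem.Set.ofList L
  · have hmem : c ∈ L := (PySem.Set.mem_ofList L c).mp hc
    rw [show (PySem.Set.ofList L).add c = PySem.Set.ofList L from by
          simp [PySem.Set.add, hmem]]
    rw [pvInsDesc_eq_of_mem _ _ (pvSortedSet_pairwise_gt L)
          ((PySem.List.mem_sorted _ _ _ _).mpr hc)]
  · have hmem : c ∉ L := fun h => hc ((PySem.Set.mem_ofList L c).mpr h)
    rw [show (PySem.Set.ofList L).add c = PySem.Set.ofList L ++ [c] from by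
          simp [PySem.Set.add, hmem]]
    apply PySem.List.sorted_rev_eq_of_perm_of_pairwise_gt
    · refine (pvInsDesc_perm_of_not_mem c _ ?_).trans ?_
      · exact fun h => hc ((PySem.List.mem_sorted _ _ _ _).mp h)
      · exact ((PySem.List.sorted_perm _ _ _).append_right [c])
    · exact pvInsDesc_pairwise _ _ (pvSortedSet_pairwise_gt L)

theorem pvInsertBy_skip {α : Type} (before : α → α → Bool) (x : α) (L R : List α)
    (h : ∀ p ∈ L, before x p = false) :
    PySem.List.insertBy before x (L ++ R) = L ++ PySem.List.insertBy before x R := by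
  induction L with
  | nil => simp
  | cons a L ih =>
      simp only [List.cons_append, PySem.List.insertBy, h a (by simp)]
      simp only [Bool.false_eq_true, if_false, List.cons.injEq, true_and]
      exact ih (fun p hp => h p (by simp [hp]))

theorem pvInsertBy_front {α : Type} (before : α → α → Bool) (x : α) (L : List α)
    (h : ∀ p ∈ L, before x p = true) :
    PySem.List.insertBy before x L = x :: L := by
  cases L with
  | nil => rfl
  | cons a L => simp [PySem.List.insertBy, h a (by simp)]

theorem pvInsertBy_flatMap (G : Int → List (String × Int)) (x : String × Int) :
    ∀ D : List Int, D.Pairwise (fun a b => b < a) →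
      (∀ v : Int, ∀ p ∈ G v, p.2 = v) → (x.2 ∉ D → G x.2 = []) →
      PySem.List.insertBy (fun a b => decide (b.2 < a.2)) x (D.flatMap G)
        = (pvInsDesc x.2 D).flatMap (fun v => if v = x.2 then G v ++ [x] else G v) := by
  intro D
  induction D with
  | nil =>
      intro _ _ hx
      simp [PySem.List.insertBy, pvInsDesc, hx (by simp)]
  | cons v vs ih =>
      intro hp hG hx
      rcases List.pairwise_cons.mp hp with ⟨hv, hvs⟩
      have hGv : ∀ p ∈ G v, p.2 = v := hG v
      have hsnd_vs : ∀ p ∈ vs.flatMap G, p.2 < v := by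
        intro p hp'
        rcases List.mem_flatMap.mp hp' with ⟨w, hw, hpw⟩
        rw [hG w p hpw]; exact hv w hw
      rcases lt_trichotomy v x.2 with hlt | heq | hgt
      · -- v < x.2 : x goes in front of everything
        have hfront : ∀ p ∈ (v :: vs).flatMap G, (fun a b => decide ((b : String × Int).2 < a.2)) x p = true := by
          intro p hp'
          rcases List.mem_flatMap.mp hp' with ⟨w, hw, hpw⟩
          rcases List.mem_cons.mp hw with rfl | hw
          · simp [hG w p hpw, hlt]
          · simp only [decide_eq_true_eq]
            rw [hG w p hpw]; exact lt_trans (hv w hw) hlt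
        rw [pvInsertBy_front _ _ _ hfront]
        have hnotin : x.2 ∉ v :: vs := by
          intro hmem
          rcases List.mem_cons.mp hmem with h | h
          · omega
          · exact absurd (hv _ h) (by omega)
        have hcong : List.flatMap (fun w => if w = x.2 then G w ++ [x] else G w) vs
            = List.flatMap G vs := by
          apply List.flatMap_congr
          intro w hw
          have hne : ¬ w = x.2 := fun h => hnotin (by simp [h ▸ hw])
          simp [hne]
        rw [show pvInsDesc x.2 (v :: vs) = x.2 :: v :: vs from by
              simp [pvInsDesc, hlt]]
        simp only [List.flatMap_cons]
        rw [hcong]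
        have hnev : ¬ v = x.2 := by omega
        simp [hx hnotin, hnev]
      · -- v = x.2 : x appended right after the group of v
        subst heq
        have hskip : ∀ p ∈ G x.2, (fun a b => decide ((b : String × Int).2 < a.2)) x p = false := by
          intro p hp'; simp [hG _ p hp']
        rw [List.flatMap_cons, pvInsertBy_skip _ _ _ _ hskip,
            pvInsertBy_front _ _ _ (by intro p hp'; simpa using hsnd_vs p hp')]
        have hcong : List.flatMap (fun w => if w = x.2 then G w ++ [x] else G w) vs
            = List.flatMap G vs := by
          apply List.flatMap_congr
          intro w hw
          have hne : ¬ w = x.2 := by have := hv w hw; omega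
          simp [hne]
        rw [show pvInsDesc x.2 (x.2 :: vs) = x.2 :: vs from by simp [pvInsDesc]]
        simp only [List.flatMap_cons]
        rw [hcong]
        simp
      · -- x.2 < v : skip the group of v and recurse
        have hskip : ∀ p ∈ G v, (fun a b => decide ((b : String × Int).2 < a.2)) x p = false := by
          intro p hp'
          simp only [decide_eq_false_iff_not, not_lt]
          rw [hG v p hp']; omega
        rw [List.flatMap_cons, pvInsertBy_skip _ _ _ _ hskip]
        have hx' : x.2 ∉ vs → G x.2 = [] := by
          intro h
          exact hx (by simp [h]; omega)
        rw [ih hvs hG hx']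
        rw [show pvInsDesc x.2 (v :: vs) = v :: pvInsDesc x.2 vs from by
              simp only [pvInsDesc]
              rw [if_neg (show ¬ v < x.2 by omega), if_neg (show ¬ v = x.2 by omega)]]
        simp only [List.flatMap_cons, if_neg (show ¬ v = x.2 by omega)]

theorem pvStableDecomp (pc : List (String × Int)) :
    PySem.List.sorted pc (fun kv => kv.2) true
      = (PySem.List.sorted (PySem.Set.ofList (pc.map Prod.snd)) (fun k => k) true).flatMap
          (fun c => pc.filter (fun p => p.2 == c)) := by
  induction pc using List.reverseRecOn with
  | nil => simp [PySem.List.sorted]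
  | append_singleton ys x ih =>
      rw [PySem.List.sorted_rev_eq_foldl_insertBy, List.foldl_append, List.foldl_cons,
          List.foldl_nil, ← PySem.List.sorted_rev_eq_foldl_insertBy, ih]
      rw [pvInsertBy_flatMap _ x _ (pvSortedSet_pairwise_gt _)
            (by intro v p hp; simpa using (List.mem_filter.mp hp).2)
            (by
              intro hnot
              rw [List.filter_eq_nil_iff]
              intro p hp
              simp only [beq_iff_eq]
              intro hpe
              apply hnot
              rw [PySem.List.mem_sorted, PySem.Set.mem_ofList]
              exact hpe ▸ List.mem_map_of_mem hp)]
      rw [List.map_append, List.map_cons, List.map_nil, PySem.Set.ofList_append_singleton,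
          pvSortedSet_add]
      apply List.flatMap_congr
      intro c hc
      rw [List.filter_append]
      by_cases hcx : c = x.2
      · subst hcx
        simp
      · simp [show ¬ (x.2 == c) = true by simpa using fun h => hcx h.symm, hcx]

theorem pvFilterCutoff (D : List Int) (G : Int → List (String × Int)) (m : Nat)
    (hG : ∀ v : Int, ∀ p ∈ G v, p.2 = v)
    (hp : D.Pairwise (fun a b => b < a)) (hm1 : 1 ≤ m) (hm : m ≤ D.length) :
    (D.flatMap G).filter (fun p => decide (D.getD (m - 1) 0 ≤ p.2))
      = (D.take m).flatMap G := by
  have hmono := List.pairwise_iff_getElem.mp hp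
  have hcut : D.getD (m - 1) 0 = D[m - 1]'(by omega) := List.getD_eq_getElem D 0 (by omega)
  rw [List.filter_flatMap]
  have hsplit : List.flatMap (fun a => (G a).filter (fun p => decide (D.getD (m - 1) 0 ≤ p.2))) D
      = List.flatMap (fun a => (G a).filter (fun p => decide (D.getD (m - 1) 0 ≤ p.2))) (D.take m)
        ++ List.flatMap (fun a => (G a).filter (fun p => decide (D.getD (m - 1) 0 ≤ p.2))) (D.drop m) := by
    rw [← List.flatMap_append, List.take_append_drop]
  rw [hsplit]
  have htake : ∀ c ∈ D.take m, (G c).filter (fun p => decide (D.getD (m - 1) 0 ≤ p.2)) = G c := by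
    intro c hc
    rcases List.getElem_of_mem hc with ⟨i, hi, hieq⟩
    have hlt : (D.take m).length = min m D.length := List.length_take
    have hilen : i < D.length := by omega
    have hiD : D[i]'hilen = c := by
      rw [← hieq]; exact (List.getElem_take ..).symm
    have him : i < m := by omega
    have hge : D.getD (m - 1) 0 ≤ c := by
      rw [hcut, ← hiD]
      rcases Nat.lt_or_ge i (m - 1) with h | h
      · exact le_of_lt (hmono i (m - 1) hilen (by omega) h)
      · have : i = m - 1 := by omega
        subst this; rfl
    rw [List.filter_eq_self]
    intro p hp'
    simp only [hG c p hp', decide_eq_true_eq]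
    exact hge
  have hdrop : ∀ c ∈ D.drop m, (G c).filter (fun p => decide (D.getD (m - 1) 0 ≤ p.2)) = [] := by
    intro c hc
    rcases List.getElem_of_mem hc with ⟨j, hj, hjeq⟩
    have hlen : (D.drop m).length = D.length - m := List.length_drop
    have hjlen : m + j < D.length := by omega
    have hjD : D[m + j]'hjlen = c := by
      rw [← hjeq]; exact (List.getElem_drop ..).symm
    have hltc : c < D.getD (m - 1) 0 := by
      rw [hcut, ← hjD]
      exact hmono (m - 1) (m + j) (by omega) (by omega) (by omega)
    rw [List.filter_eq_nil_iff]
    intro p hp'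
    simp only [hG c p hp', decide_eq_true_eq]
    omega
  rw [List.flatMap_congr htake, List.flatMap_congr hdrop]
  simp



theorem pv_main (pc : List (String × Int)) :
    get_participants_from_dict pc = get_participants_from_dict_alt pc := by
  dsimp only [get_participants_from_dict, get_participants_from_dict_alt]
  have hstep : (fun (d : PySem.Dict Int (List String)) (p : String × Int) =>
      if d.contains p.2 = false then d.insert p.2 [p.1] else d.modify p.2 [] (fun l => l ++ [p.1]))
      = (fun (d : PySem.Dict Int (List String)) (p : String × Int) =>
          d.modify p.2 [] (fun l => l ++ [p.1])) := by
    funext d p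
    by_cases h : d.contains p.2
    · simp [h]
    · simp only [Bool.not_eq_true] at h
      simp [h, PySem.Dict.modify, PySem.Dict.getD_of_not_contains _ _ h]
  rw [hstep]
  have hkeys : (pc.foldl (fun (d : PySem.Dict Int (List String)) (p : String × Int) =>
      d.modify p.2 [] (fun l => l ++ [p.1])) PySem.Dict.empty).keys
      = PySem.Set.ofList (pc.map Prod.snd) := by
    have := PySem.Dict.keys_foldl_modify_key pc (fun p => p.2) []
      (fun d p => fun l => l ++ [p.1]) PySem.Dict.empty
    simpa [PySem.Set.update_nil_left] using this
  have hgetD : ∀ c : Int, (pc.foldl (fun (d : PySem.Dict Int (List String)) (p : String × Int) =>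
      d.modify p.2 [] (fun l => l ++ [p.1])) PySem.Dict.empty).getD c []
      = (pc.filter (fun p => p.2 == c)).map Prod.fst := by
    intro c
    have hfold : pc.foldl (fun (d : PySem.Dict Int (List String)) (p : String × Int) =>
        d.modify p.2 [] (fun l => l ++ [p.1])) PySem.Dict.empty
        = (pc.map (fun p => (p.2, p.1))).foldl
            (fun (d : PySem.Dict Int (List String)) q => d.modify q.1 [] (fun l => l ++ [q.2]))
            PySem.Dict.empty := by
      rw [List.foldl_map]
    rw [hfold, PySem.Dict.getD_foldl_modify_append]
    rw [List.filter_map, List.map_map]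
    simp [Function.comp_def]
  rw [hkeys]
  set D := PySem.List.sorted (PySem.Set.ofList (pc.map Prod.snd)) (fun k => k) true with hD
  set m := pvRound07 D.length with hm
  have hmle : m ≤ D.length := pvRound07_le D.length
  have hslice : PySem.List.slice D (some 0) (some ((m : Nat) : Int)) = D.take m := by
    rw [show (some (0 : Int)) = some ((0 : Nat) : Int) from by norm_num,
        PySem.List.slice_natCast]
    simp
  rw [hslice]
  rw [PySem.List.foldl_append_eq_flatMap]
  rw [List.flatMap_congr (fun c _ => hgetD c)]
  by_cases hm0 : m = 0
  · simp [hm0]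
  · rw [if_neg hm0]
    have hm1 : 1 ≤ m := by omega
    have hcast : ((m : Int) - 1) = ((m - 1 : Nat) : Int) := by omega
    rw [hcast, PySem.List.pyGetD_natCast]
    rw [pvStableDecomp pc, ← hD]
    rw [pvFilterCutoff D (fun c => pc.filter (fun p => p.2 == c)) m
          (fun v p hp' => by simpa using (List.mem_filter.mp hp').2)
          (by rw [hD]; exact pvSortedSet_pairwise_gt _) hm1 hmle]
    rw [List.map_flatMap]
    simp

-- ===== VERDICT (by name: the statement is the Claim_ definition above) =====
theorem get_participants_from_dict_spec : Claim_equal_get_participants_from_dict := by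
  intro participants_count _
  unfold Spec_get_participants_from_dict
  exact pv_main participants_count
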